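-- pv_equiv track=rewrite | github.com/Aryan-Mi/AOC-2023 | Day-03/Solutions.py | getGearValue
-- ===== SOURCE A (Python) =====
-- def getGearValue(lines: list[list[str]], coords: list[int]):
--     [x, y] = coords
--     [i, j] = [y - 1, y + 1]
--
--     value = lines[coords[0]][coords[1]]
--     prefix = ""
--     while i >= 0:
--         if lines[x][i].isdigit():
--             prefix = lines[coords[0]][i] + prefix
--         else:
--             break
--         i -= 1
--
--     suffix = ""
--     while j < len(lines[x]):
--         if lines[x][j].isdigit():
--             suffix += lines[coords[0]][j]
--         else:
--             break
--         j += 1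
--     return prefix + value + suffix
-- ===== SOURCE B (Python) =====
-- def getGearValue(lines, coords):
--     [x, y] = coords
--     row = lines[x]
--     left = right = y
--     while left > 0 and row[left - 1].isdigit():
--         left -= 1
--     while right + 1 < len(row) and row[right + 1].isdigit():
--         right += 1
--     return "".join(row[left:right + 1])
-- ===== Notes on version B (the rewrite author's own statement) =====
-- stated objective: simpler
-- what changed: Instead of building prefix/suffix strings character-group by group in two accumulating loops, B only moves two boundary indices (left/right) over the row and materializes the answer once with a single slice and ''.join.
-- outside the precondition, e.g. on getGearValue([['1', '2']], [0, -1]): A returns '212', B returns '2'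
import Mathlib
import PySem

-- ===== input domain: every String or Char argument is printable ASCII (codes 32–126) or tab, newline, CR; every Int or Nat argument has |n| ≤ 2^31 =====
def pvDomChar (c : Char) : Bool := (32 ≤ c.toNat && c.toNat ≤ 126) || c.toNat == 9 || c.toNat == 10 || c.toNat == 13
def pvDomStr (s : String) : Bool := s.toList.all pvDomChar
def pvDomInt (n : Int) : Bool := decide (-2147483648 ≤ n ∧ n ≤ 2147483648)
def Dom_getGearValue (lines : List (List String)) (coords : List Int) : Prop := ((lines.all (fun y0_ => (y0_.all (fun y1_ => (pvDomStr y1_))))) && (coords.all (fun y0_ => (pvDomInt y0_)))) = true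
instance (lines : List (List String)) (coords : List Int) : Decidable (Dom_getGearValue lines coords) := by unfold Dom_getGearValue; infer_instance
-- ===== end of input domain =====

-- B replaces A's two string-accumulating loops by two boundary-index scans and one slice+join
-- (return value only; neither version mutates its arguments).

-- ===== PORT A =====
-- while i >= 0: if row[i].isdigit(): prefix = row[i] + prefix else break; i -= 1
-- fuel k encodes i = k - 1 (k = 0 ⇔ i < 0, loop exits).
def aPrefixLoop (row : List String) : Nat → String → String
  | 0, acc => acc
  | k+1, acc =>
    let s := row.getD k ""
    if PySem.Str.strIsdigit s then aPrefixLoop row k (s ++ acc) else acc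

-- while j < len(row): if row[j].isdigit(): suffix += row[j] else break; j += 1
def aSuffixLoop (row : List String) (j : Nat) (acc : String) : String :=
  if j < row.length then
    let s := row.getD j ""
    if PySem.Str.strIsdigit s then aSuffixLoop row (j+1) (acc ++ s) else acc
  else acc
  termination_by row.length - j

def getGearValue (lines : List (List String)) (coords : List Int) : String :=
  match coords with
  | [x, y] =>
    let row := PySem.List.pyGetD lines x []
    let value := row.getD y.toNat ""
    let prefixS := aPrefixLoop row y.toNat ""
    let suffixS := aSuffixLoop row (y.toNat + 1) ""
    prefixS ++ value ++ suffixS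
  | _ => ""  -- unreachable under Pre_ (Python raises on len(coords) ≠ 2)

-- ===== PORT B =====
-- while left > 0 and row[left-1].isdigit(): left -= 1
def bLeft (row : List String) : Nat → Nat
  | 0 => 0
  | l+1 => if PySem.Str.strIsdigit (row.getD l "") then bLeft row l else l+1

-- while right + 1 < len(row) and row[right+1].isdigit(): right += 1
def bRight (row : List String) (r : Nat) : Nat :=
  if r + 1 < row.length ∧ PySem.Str.strIsdigit (row.getD (r+1) "") then bRight row (r+1) else r
  termination_by row.length - r

def getGearValue_alt (lines : List (List String)) (coords : List Int) : String :=
  if coords.length = 2 then   -- the [x, y] = coords unpack; Python raises otherwise (outside Pre_)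
    let x := coords.getD 0 0
    let y := coords.getD 1 0
    let row := PySem.List.pyGetD lines x []
    let left := bLeft row y.toNat
    let right := bRight row y.toNat
    PySem.Str.join "" (PySem.List.slice row (some (left : Int)) (some ((right + 1 : Nat) : Int)))
  else ""

-- ===== PRECONDITION & SPEC =====
-- Pre_ excludes inputs where Python A raises (coords not a pair, row index out of wrap range,
-- column index y out of [0, len(row))); it also excludes negative in-wrap-range column indices y,
-- on which A's value (empty prefix plus a suffix scanned from index 0) is an accident of
-- negative-index wraparound outside the task's natural domain of grid coordinates.
def Pre_getGearValue (lines : List (List String)) (coords : List Int) : Prop :=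
  coords.length = 2 ∧
  PySem.Raise.InRange lines.length (coords.getD 0 0) ∧
  0 ≤ coords.getD 1 0 ∧
  coords.getD 1 0 < (PySem.List.pyGetD lines (coords.getD 0 0) []).length
instance (lines : List (List String)) (coords : List Int) : Decidable (Pre_getGearValue lines coords) := by unfold Pre_getGearValue; infer_instance

def pvWitness_getGearValue : List (List String) × List Int := ([["1", "2", "+", "3"]], [0, 1])

def Spec_getGearValue (lines : List (List String)) (coords : List Int) (out : String) : Prop := out = getGearValue_alt lines coords
instance (lines : List (List String)) (coords : List Int) (out : String) : Decidable (Spec_getGearValue lines coords out) := by unfold Spec_getGearValue; infer_instance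

-- ===== CLAIM (what is proved, stated in full; the proofs are below) =====
def Claim_equal_getGearValue : Prop := ∀ (lines : List (List String)) (coords : List Int), Dom_getGearValue lines coords → Pre_getGearValue lines coords → Spec_getGearValue lines coords (getGearValue lines coords)

-- ===== LEMMAS AND PROOFS =====

-- concatenation of the strings of a row segment, on the character-list level
def cat (xs : List String) : List Char := (xs.map String.toList).flatten

theorem cat_append (xs ys : List String) : cat (xs ++ ys) = cat xs ++ cat ys := by
  simp [cat]

theorem bLeft_le (row : List String) (k : Nat) : bLeft row k ≤ k := by
  induction k with
  | zero => simp [bLeft]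
  | succ k ih => simp only [bLeft]; split <;> omega

theorem le_bRight (row : List String) (r : Nat) : r ≤ bRight row r := by
  fun_induction bRight with
  | case1 r h ih => omega
  | case2 r h => omega

theorem bRight_lt (row : List String) (r : Nat) (h : r < row.length) :
    bRight row r < row.length := by
  fun_induction bRight with
  | case1 r h2 ih => exact ih (by omega)
  | case2 r h2 => exact h

theorem flatten_intersperse_nil {A : Type} (l : List (List A)) :
    (List.intersperse ([] : List A) l).flatten = l.flatten := by
  induction l with
  | nil => simp
  | cons a l ih => cases l <;> simp_all [List.intersperse]

theorem join_toList (parts : List String) :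
    (PySem.Str.join "" parts).toList = cat parts := by
  rw [PySem.Str.toList_join]
  simp [PySem.Chars.join, List.intercalate, cat, flatten_intersperse_nil]

theorem aPrefixLoop_eq (row : List String) (k : Nat) (acc : String) :
    (aPrefixLoop row k acc).toList
      = cat ((row.drop (bLeft row k)).take (k - bLeft row k)) ++ acc.toList := by
  induction k generalizing acc with
  | zero => simp [aPrefixLoop, bLeft, cat]
  | succ k ih =>
    simp only [aPrefixLoop, bLeft]
    by_cases hd : PySem.Str.strIsdigit (row.getD k "") = true
    · simp only [hd, if_pos]
      rw [ih]
      have hle : bLeft row k ≤ k := bLeft_le row k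
      have hk : k < row.length := by
        by_contra h
        have : row.getD k "" = "" := List.getD_eq_default _ _ (by omega)
        rw [this] at hd
        simp [PySem.Str.strIsdigit, PySem.Chars.strIsdigit] at hd
      have hsplit : (row.drop (bLeft row k)).take (k + 1 - bLeft row k)
          = (row.drop (bLeft row k)).take (k - bLeft row k) ++ [row.getD k ""] := by
        have h1 : k + 1 - bLeft row k = (k - bLeft row k) + 1 := by omega
        rw [h1, List.take_add]
        congr 1
        have h2 : (row.drop (bLeft row k)).drop (k - bLeft row k) = row.drop k := by
          rw [List.drop_drop]; congr 1; omega
        rw [h2]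
        have h3 : row.drop k = row.getD k "" :: row.drop (k+1) := by
          rw [List.getD_eq_getElem _ _ hk]
          exact (List.drop_eq_getElem_cons hk)
        rw [h3]; simp
      rw [hsplit, cat_append]
      simp [cat]
    · rw [if_neg hd, if_neg hd]
      simp [cat]

theorem aSuffixLoop_eq_aux (row : List String) :
    ∀ (n r : Nat) (acc : String), row.length - r ≤ n →
    (aSuffixLoop row (r+1) acc).toList
      = acc.toList ++ cat ((row.drop (r+1)).take (bRight row r + 1 - (r+1))) := by
  intro n
  induction n with
  | zero =>
    intro r acc h
    rw [aSuffixLoop, bRight]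
    rw [if_neg (by omega), if_neg (fun hc => absurd hc.1 (by omega))]
    simp [cat]
  | succ n ih =>
    intro r acc h
    rw [aSuffixLoop, bRight]
    by_cases h1 : r + 1 < row.length
    · rw [if_pos h1]
      by_cases hd : PySem.Str.strIsdigit (row.getD (r+1) "") = true
      · rw [if_pos hd, if_pos ⟨h1, hd⟩]
        rw [ih (r+1) (acc ++ row.getD (r+1) "") (by omega)]
        have hR := le_bRight row (r+1)
        have hsplit : (row.drop (r+1)).take (bRight row (r+1) + 1 - (r+1))
            = row.getD (r+1) "" :: (row.drop (r+2)).take (bRight row (r+1) + 1 - (r+2)) := by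
          have h3 : row.drop (r+1) = row.getD (r+1) "" :: row.drop (r+2) := by
            rw [List.getD_eq_getElem _ _ h1]; exact List.drop_eq_getElem_cons h1
          rw [h3]
          have h4 : bRight row (r+1) + 1 - (r+1) = (bRight row (r+1) + 1 - (r+2)) + 1 := by omega
          rw [h4, List.take_succ_cons]
        rw [hsplit]
        simp [cat]
      · rw [if_neg hd, if_neg (fun hc => hd hc.2)]
        simp [cat]
    · rw [if_neg h1, if_neg (fun hc => h1 hc.1)]
      simp [cat]

theorem aSuffixLoop_eq (row : List String) (r : Nat) (acc : String) :
    (aSuffixLoop row (r+1) acc).toList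
      = acc.toList ++ cat ((row.drop (r+1)).take (bRight row r + 1 - (r+1))) :=
  aSuffixLoop_eq_aux row row.length r acc (by omega)

theorem string_eq_of_toList (s t : String) (h : s.toList = t.toList) : s = t := by
  have := congrArg String.ofList h
  simpa using this

-- ===== VERDICT (by name: the statement is the Claim_ definition above) =====
theorem getGearValue_spec : Claim_equal_getGearValue := by
  intro lines coords _hdom hpre
  obtain ⟨hlen, hx, hy0, hy1⟩ := hpre
  rcases coords with _ | ⟨x, _ | ⟨y, _ | ⟨z, t⟩⟩⟩
  · simp at hlen
  · simp at hlen
  · show getGearValue lines [x, y] = getGearValue_alt lines [x, y]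
    simp only [List.getD_cons_zero, List.getD_cons_succ] at hx hy0 hy1
    simp only [getGearValue, getGearValue_alt]
    rw [if_pos (by simp)]
    simp only [List.getD_cons_zero, List.getD_cons_succ]
    set row := PySem.List.pyGetD lines x [] with hrow
    have hy : y.toNat < row.length := by omega
    have hl : bLeft row y.toNat ≤ y.toNat := bLeft_le row y.toNat
    have hr : y.toNat ≤ bRight row y.toNat := le_bRight row y.toNat
    have hrl : bRight row y.toNat < row.length := bRight_lt row y.toNat hy
    apply string_eq_of_toList
    rw [String.toList_append, String.toList_append, aPrefixLoop_eq, aSuffixLoop_eq,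
        join_toList, PySem.List.slice_natCast]
    set l := bLeft row y.toNat
    set r := bRight row y.toNat
    have hsplit : (row.drop l).take (r + 1 - l)
        = (row.drop l).take (y.toNat - l)
          ++ (row.getD y.toNat "" :: (row.drop (y.toNat + 1)).take (r + 1 - (y.toNat + 1))) := by
      have h1 : r + 1 - l = (y.toNat - l) + (1 + (r - y.toNat)) := by omega
      rw [h1, List.take_add]
      congr 1
      rw [List.drop_drop]
      have h2 : l + (y.toNat - l) = y.toNat := by omega
      rw [h2]
      have h3 : row.drop y.toNat = row.getD y.toNat "" :: row.drop (y.toNat + 1) := by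
        rw [List.getD_eq_getElem _ _ hy]; exact List.drop_eq_getElem_cons hy
      rw [h3]
      have h4 : 1 + (r - y.toNat) = (r - y.toNat) + 1 := by omega
      rw [h4, List.take_succ_cons]
      have h5 : r - y.toNat = r + 1 - (y.toNat + 1) := by omega
      rw [h5]
    rw [hsplit, cat_append]
    simp [cat]
  · simp at hlen
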